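-- pv_equiv track=rewrite | github.com/guiwitz/MorphoDynamics | morphodynamics/napari_plugin/napari_gui.py | _get_layer_indices
-- ===== SOURCE A (Python) =====
-- def _get_layer_indices(windows):
--     """Given a windows list of lists, create a dictionary where each entry i
--     contains the labels of all windows in layer i"""
--
--     layer_indices= {}
--     count=1
--     for i in range(len(windows)):
--         gather_indices=[]
--         for j in range(len(windows[i])):
--             gather_indices.append(count)
--             count+=1
--         layer_indices[i]=gather_indices
--     return layer_indices
-- ===== SOURCE B (Python) =====
-- def _get_layer_indices(windows):
--     """Given a windows list of lists, create a dictionary where each entry i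
--     contains the labels of all windows in layer i"""
--
--     lengths = [len(w) for w in windows]
--     offsets = [1]
--     for l in lengths:
--         offsets.append(offsets[-1] + l)
--     return {i: list(range(offsets[i], offsets[i] + lengths[i]))
--             for i in range(len(windows))}
-- ===== Notes on version B (the rewrite author's own statement) =====
-- stated objective: idiomatic
-- what changed: Replaces the nested loops threading one running counter through every window with a prefix-sum offsets table over the layer lengths followed by a dict comprehension emitting each layer's labels as a single range.
import Mathlib
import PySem

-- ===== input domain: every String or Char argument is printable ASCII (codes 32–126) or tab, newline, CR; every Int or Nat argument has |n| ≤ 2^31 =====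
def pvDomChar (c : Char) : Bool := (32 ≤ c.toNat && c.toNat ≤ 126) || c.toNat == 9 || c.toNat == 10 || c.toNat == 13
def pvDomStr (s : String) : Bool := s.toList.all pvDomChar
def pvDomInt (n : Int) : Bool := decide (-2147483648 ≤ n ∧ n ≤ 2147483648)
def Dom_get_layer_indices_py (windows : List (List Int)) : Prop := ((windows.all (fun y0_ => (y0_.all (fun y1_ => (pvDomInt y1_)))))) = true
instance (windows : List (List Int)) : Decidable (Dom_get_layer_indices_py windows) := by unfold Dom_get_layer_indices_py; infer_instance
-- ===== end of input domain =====

-- B replaces A's nested counter loops by a prefix-sum offsets table and a per-layer range comprehension (idiomatic; same cost).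


-- ===== PORT A =====
-- literal port: dict + running counter, outer loop over range(len(windows)), inner loop over range(len(windows[i]))
def get_layer_indices_py (windows : List (List Int)) : List (Int × List Int) :=
  let st := (PySem.List.pyRange 0 (PySem.List.len windows) 1).foldl
    (fun (st : PySem.Dict Int (List Int) × Int) i =>
      let inner := (PySem.List.pyRange 0 (PySem.List.len (PySem.List.pyGetD windows i [])) 1).foldl
        (fun (g : List Int × Int) _j => (g.1 ++ [g.2], g.2 + 1)) (([] : List Int), st.2)
      (st.1.insert i inner.1, inner.2))
    ((PySem.Dict.empty : PySem.Dict Int (List Int)), (1 : Int))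
  st.1.items

-- ===== PORT B =====
-- literal port of Source B: lengths list, prefix-sum offsets (offsets[-1] via pyGetD at -1),
-- then the dict comprehension over range(len(windows)); its keys are distinct in order,
-- so the resulting dict's items are exactly this map.
def get_layer_indices_py_alt (windows : List (List Int)) : List (Int × List Int) :=
  let lengths := windows.map PySem.List.len
  let offsets := lengths.foldl
    (fun acc l => acc ++ [PySem.List.pyGetD acc (-1) 0 + l]) [(1 : Int)]
  (PySem.List.pyRange 0 (PySem.List.len windows) 1).map (fun i =>
    (i, PySem.List.pyRange (PySem.List.pyGetD offsets i 0)
          (PySem.List.pyGetD offsets i 0 + PySem.List.pyGetD lengths i 0) 1))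

-- ===== PRECONDITION & SPEC =====
def Spec_get_layer_indices_py (windows : List (List Int)) (out : List (Int × List Int)) : Prop := out = get_layer_indices_py_alt windows
instance (windows : List (List Int)) (out : List (Int × List Int)) : Decidable (Spec_get_layer_indices_py windows out) := by unfold Spec_get_layer_indices_py; infer_instance

-- ===== CLAIM (what is proved, stated in full; the proofs are below) =====
def Claim_equal_get_layer_indices_py : Prop := ∀ (windows : List (List Int)), Dom_get_layer_indices_py windows → Spec_get_layer_indices_py windows (get_layer_indices_py windows)

-- ===== LEMMAS AND PROOFS =====

-- common reference value: layer labels starting at key s, counter c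
def pvRefGL (ws : List (List Int)) (s c : Int) : List (Int × List Int) :=
  match ws with
  | [] => []
  | w :: rest =>
      (s, PySem.List.pyRange c (c + w.length) 1) :: pvRefGL rest (s + 1) (c + w.length)

-- A's loop body as a named function of the state and an (index, layer) pair
def pvStepA (st : PySem.Dict Int (List Int) × Int) (p : Int × List Int) :
    PySem.Dict Int (List Int) × Int :=
  let inner := (PySem.List.pyRange 0 (PySem.List.len p.2) 1).foldl
    (fun (g : List Int × Int) _j => (g.1 ++ [g.2], g.2 + 1)) (([] : List Int), st.2)
  (st.1.insert p.1 inner.1, inner.2)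

theorem pvRefGL_length (ws : List (List Int)) (s c : Int) : (pvRefGL ws s c).length = ws.length := by
  induction ws generalizing s c with
  | nil => rfl
  | cons w rest ih => simp [pvRefGL, ih]

theorem pvRefGL_getElem (ws : List (List Int)) (s c : Int) (k : Nat) (hk : k < ws.length) :
    (pvRefGL ws s c)[k]'(by rw [pvRefGL_length]; exact hk) =
      (s + k, PySem.List.pyRange (c + ((ws.map PySem.List.len).take k).sum)
        (c + ((ws.map PySem.List.len).take k).sum + (ws[k].length : Int)) 1) := by
  induction ws generalizing s c k with
  | nil => simp at hk
  | cons w rest ih =>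
      cases k with
      | zero => simp [pvRefGL]
      | succ k =>
          have hk' : k < rest.length := by simpa using hk
          have := ih (s + 1) (c + w.length) k hk'
          simp only [pvRefGL, List.getElem_cons_succ, this, List.map_cons, List.take_succ_cons,
            List.sum_cons, PySem.List.len]
          simp only [Prod.mk.injEq]
          refine ⟨by push_cast; ring, ?_⟩
          congr 1 <;> ring

-- inner loop of A: appending the counter n times produces a range
theorem pvInnerFold (n : Nat) (acc : List Int) (c : Int) :
    (PySem.List.pyRange 0 (n : Int) 1).foldl
        (fun (g : List Int × Int) _j => (g.1 ++ [g.2], g.2 + 1)) (acc, c)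
      = (acc ++ PySem.List.pyRange c (c + n) 1, c + n) := by
  induction n generalizing acc c with
  | zero => simp [PySem.List.pyRange_one_eq_nil]
  | succ n ih =>
      rw [show ((n + 1 : Nat) : Int) = (n : Int) + 1 by push_cast; ring,
        PySem.List.pyRange_one_succ_right (by omega), List.foldl_append, ih]
      rw [show c + ((n : Int) + 1) = (c + n) + 1 by ring,
        PySem.List.pyRange_one_succ_right (by omega)]
      simp [List.append_assoc]

-- outer loop of A over enumerate: appends one reference entry per layer
theorem pvOuterFold (ws : List (List Int)) (s : Int) (d : PySem.Dict Int (List Int)) (c : Int)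
    (hd : ∀ p ∈ d.items, p.1 < s) :
    (PySem.List.enumerate ws s).foldl pvStepA (d, c)
      = (PySem.Dict.mk (d.items ++ pvRefGL ws s c), c + ((ws.map PySem.List.len).sum)) := by
  induction ws generalizing s d c with
  | nil => cases d; simp [PySem.List.enumerate_nil, pvRefGL]
  | cons w rest ih =>
      rw [PySem.List.enumerate_cons, List.foldl_cons]
      have hstep : pvStepA (d, c) (s, w)
          = (d.insert s (PySem.List.pyRange c (c + w.length) 1), c + w.length) := by
        simp only [pvStepA, PySem.List.len]
        rw [pvInnerFold w.length [] c]
        simp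
      rw [hstep]
      have hnc : d.contains s = false := by
        cases hcon : d.contains s
        · rfl
        · exfalso
          have : s ∈ d.keys := (PySem.Dict.contains_iff_mem_keys d s).mp hcon
          simp only [PySem.Dict.keys, List.mem_map] at this
          obtain ⟨p, hp, hps⟩ := this
          have := hd p hp; omega
      have hins : d.insert s (PySem.List.pyRange c (c + w.length) 1)
          = PySem.Dict.mk (d.items ++ [(s, PySem.List.pyRange c (c + w.length) 1)]) := by
        apply PySem.Dict.ext
        rw [PySem.Dict.items_insert]
        simp [hnc]
      rw [hins]
      rw [ih (s + 1) _ (c + w.length) (by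
        intro p hp
        simp only [List.mem_append, List.mem_singleton] at hp
        rcases hp with hp | hp
        · have := hd p hp; omega
        · subst hp; omega)]
      simp only [pvRefGL, List.map_cons, List.sum_cons, PySem.List.len]
      simp only [Prod.mk.injEq, List.append_assoc, List.singleton_append, true_and]
      ring

theorem pvA_eq_ref (ws : List (List Int)) :
    get_layer_indices_py ws = pvRefGL ws 0 1 := by
  have h : get_layer_indices_py ws
      = ((PySem.List.enumerate ws 0).foldl pvStepA
          ((PySem.Dict.empty : PySem.Dict Int (List Int)), (1 : Int))).1.items := by
    rw [PySem.List.enumerate_eq_map_pyRange ws ([] : List Int), List.foldl_map]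
    rfl
  rw [h, pvOuterFold ws 0 PySem.Dict.empty 1 (by simp [PySem.Dict.empty])]
  simp [PySem.Dict.empty]

-- B's offsets loop builds the prefix sums
def pvOffsFrom (t : Int) : List Int → List Int
  | [] => []
  | l :: ls => (t + l) :: pvOffsFrom (t + l) ls

theorem pvOffsFold (ls : List Int) (acc : List Int) (t : Int)
    (hne : acc ≠ []) (hlast : acc.getLast hne = t) :
    ls.foldl (fun acc l => acc ++ [PySem.List.pyGetD acc (-1) 0 + l]) acc
      = acc ++ pvOffsFrom t ls := by
  induction ls generalizing acc t with
  | nil => simp [pvOffsFrom]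
  | cons l ls ih =>
      rw [List.foldl_cons, PySem.List.pyGetD_neg_one acc 0 hne, hlast]
      rw [ih (acc ++ [t + l]) (t + l) (by simp) (by simp)]
      simp [pvOffsFrom]

theorem pvOffsFrom_getElem? (ls : List Int) (t : Int) (k : Nat) (hk : k < ls.length) :
    (pvOffsFrom t ls)[k]? = some (t + (ls.take (k + 1)).sum) := by
  induction ls generalizing t k with
  | nil => simp at hk
  | cons l ls ih =>
      cases k with
      | zero => simp [pvOffsFrom]
      | succ k =>
          have hk' : k < ls.length := by simpa using hk
          simp [pvOffsFrom, ih (t + l) k hk', List.take_succ_cons]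
          ring

theorem pvB_eq_ref (ws : List (List Int)) :
    get_layer_indices_py_alt ws = pvRefGL ws 0 1 := by
  have hoffs : (ws.map PySem.List.len).foldl
        (fun acc l => acc ++ [PySem.List.pyGetD acc (-1) 0 + l]) [(1 : Int)]
      = [(1 : Int)] ++ pvOffsFrom 1 (ws.map PySem.List.len) :=
    pvOffsFold _ _ _ (by simp) (by simp)
  show (PySem.List.pyRange 0 (PySem.List.len ws) 1).map (fun i =>
      (i, PySem.List.pyRange
        (PySem.List.pyGetD ((ws.map PySem.List.len).foldl
          (fun acc l => acc ++ [PySem.List.pyGetD acc (-1) 0 + l]) [(1 : Int)]) i 0)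
        (PySem.List.pyGetD ((ws.map PySem.List.len).foldl
          (fun acc l => acc ++ [PySem.List.pyGetD acc (-1) 0 + l]) [(1 : Int)]) i 0
          + PySem.List.pyGetD (ws.map PySem.List.len) i 0) 1))
    = pvRefGL ws 0 1
  rw [hoffs]
  apply List.ext_getElem?
  intro k
  by_cases hk : k < ws.length
  · have hlen1 : PySem.List.len ws = ((ws.length : Nat) : Int) := by simp [PySem.List.len]
    rw [hlen1, PySem.List.getElem?_map_pyRange_zero _ ws.length k hk]
    rw [List.getElem?_eq_getElem (by rw [pvRefGL_length]; exact hk), pvRefGL_getElem ws 0 1 k hk]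
    have hofs : PySem.List.pyGetD ([(1 : Int)] ++ pvOffsFrom 1 (ws.map PySem.List.len)) (k : Int) 0
        = 1 + ((ws.map PySem.List.len).take k).sum := by
      rw [PySem.List.pyGetD_natCast]
      cases k with
      | zero => simp
      | succ k =>
          have hk' : k < (ws.map PySem.List.len).length := by simp; omega
          simp only [List.singleton_append, List.getD, List.getElem?_cons_succ]
          rw [pvOffsFrom_getElem? (ws.map PySem.List.len) 1 k hk']
          simp
    have hlk : PySem.List.pyGetD (ws.map PySem.List.len) (k : Int) 0 = (ws[k].length : Int) := by
      rw [PySem.List.pyGetD_natCast]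
      rw [List.getD_eq_getElem?_getD, List.getElem?_map]
      simp [List.getElem?_eq_getElem hk, PySem.List.len]
    rw [hofs, hlk]
    simp only [Option.some.injEq, Prod.mk.injEq]
    exact ⟨by omega, trivial⟩
  · have h1 : ws.length ≤ k := by omega
    rw [List.getElem?_eq_none (by
        rw [List.length_map, PySem.List.length_pyRange_one]
        simp only [PySem.List.len]
        omega),
      List.getElem?_eq_none (by rw [pvRefGL_length]; exact h1)]

-- ===== VERDICT (by name: the statement is the Claim_ definition above) =====
theorem get_layer_indices_py_spec : Claim_equal_get_layer_indices_py := by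
  intro windows _
  unfold Spec_get_layer_indices_py
  rw [pvA_eq_ref, pvB_eq_ref]
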